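-- pv_equiv track=rewrite | github.com/mostafakt/Game-Highlighter | main.py | FramesToSeconds
-- ===== SOURCE A (Python) =====
-- def FramesToSeconds(frames,fps):
--     length = len(frames)
--     secLen = int(length/fps)
--     sec = []
--     for i in range(secLen):
--         sec.append(0)
--     for i in range(length):
--         if frames[i]==1:
--             fn = i
--             value = int(fn/fps)
--             if value<secLen:
--                 sec[value] = 1
--     return sec
-- ===== SOURCE B (Python) =====
-- def FramesToSeconds(frames, fps):
--     secLen = int(len(frames) / fps)
--     sec = []
--     for s in range(secLen):
--         sec.append(1 if 1 in frames[s * fps:(s + 1) * fps] else 0)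
--     return sec
-- ===== Notes on version B (the rewrite author's own statement) =====
-- stated objective: simpler
-- what changed: Replaces A's per-frame division and scatter-write into a preallocated array by a single loop over seconds that slices the corresponding frame window and tests whether it contains a flagged frame; no per-index second computation at all.
-- outside the precondition, e.g. on FramesToSeconds([1, 0, 1], 0): A raises ZeroDivisionError, B raises ZeroDivisionError
import Mathlib
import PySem

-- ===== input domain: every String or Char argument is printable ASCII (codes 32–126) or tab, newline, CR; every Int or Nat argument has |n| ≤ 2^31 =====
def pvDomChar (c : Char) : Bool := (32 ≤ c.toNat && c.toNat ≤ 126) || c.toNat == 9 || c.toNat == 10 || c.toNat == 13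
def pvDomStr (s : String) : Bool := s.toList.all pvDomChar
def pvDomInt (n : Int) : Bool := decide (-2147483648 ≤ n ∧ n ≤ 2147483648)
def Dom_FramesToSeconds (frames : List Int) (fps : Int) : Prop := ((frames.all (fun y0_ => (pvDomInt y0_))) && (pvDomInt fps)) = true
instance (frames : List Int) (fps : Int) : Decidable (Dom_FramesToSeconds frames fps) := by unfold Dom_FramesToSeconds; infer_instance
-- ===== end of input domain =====

-- B drops A's per-frame division and scatter-write entirely: it loops over the output
-- seconds and tests each second's frame window (a slice) for a flagged frame (objective: simpler).

-- ===== PORT A =====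
-- int(x/y) on ints is exact truncating division here (PySem.Int.truncdiv, exact for |a|,|b| < 2^53);
-- sec[value] = 1 is always an in-range write when reached, so pySetD is exact.
def FramesToSeconds (frames : List Int) (fps : Int) : List Int :=
  let length : Int := frames.length
  let secLen : Int := PySem.Int.truncdiv length fps
  let sec := (PySem.List.pyRange 0 secLen 1).foldl (fun sec _ => sec ++ [(0 : Int)]) []
  (PySem.List.pyRange 0 length 1).foldl
    (fun sec i =>
      if PySem.List.pyGetD frames i 0 == 1 then
        let value := PySem.Int.truncdiv i fps
        if value < secLen then PySem.List.pySetD sec value 1 else sec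
      else sec) sec

-- ===== PORT B =====
-- '1 in frames[s*fps:(s+1)*fps]' is PySem.List.slice + List.contains.
def FramesToSeconds_alt (frames : List Int) (fps : Int) : List Int :=
  let secLen : Int := PySem.Int.truncdiv (frames.length : Int) fps
  (PySem.List.pyRange 0 secLen 1).foldl
    (fun sec s =>
      sec ++ [if (PySem.List.slice frames (some (s * fps)) (some ((s + 1) * fps))).contains 1 then (1 : Int) else 0]) []

-- ===== PRECONDITION & SPEC =====
-- Pre_ excludes exactly fps = 0, where Python A raises ZeroDivisionError.
def Pre_FramesToSeconds (frames : List Int) (fps : Int) : Prop := fps ≠ 0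
instance (frames : List Int) (fps : Int) : Decidable (Pre_FramesToSeconds frames fps) := by unfold Pre_FramesToSeconds; infer_instance
def pvWitness_FramesToSeconds : List Int × Int := ([1, 0, 1, 0, 0], 2)

def Spec_FramesToSeconds (frames : List Int) (fps : Int) (out : List Int) : Prop := out = FramesToSeconds_alt frames fps
instance (frames : List Int) (fps : Int) (out : List Int) : Decidable (Spec_FramesToSeconds frames fps out) := by unfold Spec_FramesToSeconds; infer_instance

-- ===== CLAIM (what is proved, stated in full; the proofs are below) =====
def Claim_equal_FramesToSeconds : Prop := ∀ (frames : List Int) (fps : Int), Dom_FramesToSeconds frames fps → Pre_FramesToSeconds frames fps → Spec_FramesToSeconds frames fps (FramesToSeconds frames fps)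

-- ===== LEMMAS AND PROOFS =====

-- PySem.Int.truncdiv is Int.tdiv; on a nonneg dividend and positive divisor it is floor
-- division, characterised by the usual window inequalities.
theorem truncdiv_eq_iff (i fps s : Int) (hi : 0 ≤ i) (hf : 0 < fps) :
    PySem.Int.truncdiv i fps = s ↔ s * fps ≤ i ∧ i < (s + 1) * fps := by
  have htd : PySem.Int.truncdiv i fps = i / fps := by
    show i.tdiv fps = i / fps
    rw [Int.tdiv_eq_ediv]
    have : 0 ≤ i % fps := Int.emod_nonneg i hf.ne'
    simp [hi]
  rw [htd]
  constructor
  · rintro rfl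
    exact ⟨Int.ediv_mul_le i hf.ne' |>.trans_eq' rfl, Int.lt_ediv_add_one_mul_self i hf⟩
  · rintro ⟨h1, h2⟩
    have ha : s ≤ i / fps := Int.le_ediv_iff_mul_le hf |>.2 h1
    have hb : i / fps < s + 1 := Int.ediv_lt_iff_lt_mul hf |>.2 h2
    omega

-- A's write loop leaves an empty list empty (every write on [] is a no-op).
theorem foldl_step_nil (frames : List Int) (fps secLen : Int) (L : List Int) :
    L.foldl
      (fun sec i =>
        if PySem.List.pyGetD frames i 0 == 1 then
          if PySem.Int.truncdiv i fps < secLen then PySem.List.pySetD sec (PySem.Int.truncdiv i fps) 1 else sec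
        else sec) ([] : List Int) = [] := by
  induction L with
  | nil => rfl
  | cons i L ih =>
      simp only [List.foldl_cons]
      have hstep :
          (if PySem.List.pyGetD frames i 0 == 1 then
            if PySem.Int.truncdiv i fps < secLen then PySem.List.pySetD ([] : List Int) (PySem.Int.truncdiv i fps) 1 else ([] : List Int)
          else ([] : List Int)) = ([] : List Int) := by
        simp only [PySem.List.pySetD, PySem.List.pySet?, PySem.List.pyIdx?]
        split_ifs <;> rfl
      rw [hstep]
      exact ih

-- One pass of A's write loop over a list represented as a map over the output range,
-- for positive fps: each processed index i with frames[i] == 1 switches position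
-- truncdiv i fps of the output to 1.
theorem fold_inv (frames : List Int) (fps : Int) (hfps : 0 < fps) (secLen : Int)
    (L : List Int) (hL : ∀ i ∈ L, 0 ≤ i) (g : Int → Int) :
    L.foldl
      (fun sec i =>
        if PySem.List.pyGetD frames i 0 == 1 then
          if PySem.Int.truncdiv i fps < secLen then PySem.List.pySetD sec (PySem.Int.truncdiv i fps) 1 else sec
        else sec) ((PySem.List.pyRange 0 secLen 1).map g)
    = (PySem.List.pyRange 0 secLen 1).map
        (fun s => if L.any (fun i => PySem.List.pyGetD frames i 0 == 1 && PySem.Int.truncdiv i fps == s) then 1 else g s) := by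
  induction L generalizing g with
  | nil => simp
  | cons i L ih =>
      have hi : 0 ≤ i := hL i (by simp)
      have hL' : ∀ j ∈ L, 0 ≤ j := fun j hj => hL j (by simp [hj])
      simp only [List.foldl_cons]
      have hstep :
          (if PySem.List.pyGetD frames i 0 == 1 then
            if PySem.Int.truncdiv i fps < secLen then PySem.List.pySetD ((PySem.List.pyRange 0 secLen 1).map g) (PySem.Int.truncdiv i fps) 1
            else (PySem.List.pyRange 0 secLen 1).map g
          else (PySem.List.pyRange 0 secLen 1).map g)
          = (PySem.List.pyRange 0 secLen 1).map
              (fun s => if PySem.List.pyGetD frames i 0 == 1 && PySem.Int.truncdiv i fps == s then 1 else g s) := by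
        by_cases hv : PySem.List.pyGetD frames i 0 == 1
        · simp only [hv, if_true, Bool.true_and]
          have hval : 0 ≤ PySem.Int.truncdiv i fps := Int.tdiv_nonneg hi hfps.le
          by_cases hlt : PySem.Int.truncdiv i fps < secLen
          · simp only [hlt, if_true]
            rw [PySem.List.pySetD_of_nonneg _ _ hval]
            apply List.ext_getElem
            · simp
            · intro k h1 h2
              simp only [List.getElem_set, List.getElem_map,
                PySem.List.getElem_pyRange_one, beq_iff_eq]
              split_ifs <;> first | rfl | (exfalso; omega)
          · simp only [hlt, if_false]
            apply List.map_congr_left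
            intro s hs
            have hsR : 0 ≤ s ∧ s < secLen := PySem.List.mem_pyRange_one.1 hs
            have hne : ¬ (PySem.Int.truncdiv i fps == s) = true := by
              simp only [beq_iff_eq]; omega
            simp [hne]
        · simp [hv]
      rw [hstep, ih hL']
      apply List.map_congr_left
      intro s _
      cases h1 : (PySem.List.pyGetD frames i 0 == 1 && PySem.Int.truncdiv i fps == s) <;>
        cases h2 : L.any (fun j => PySem.List.pyGetD frames j 0 == 1 && PySem.Int.truncdiv j fps == s) <;>
          simp [List.any_cons, h1, h2]

-- "Some frame index processed by A hits second s" is exactly "second s's frame window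
-- (B's slice) contains a flagged frame".
theorem any_eq_slice (frames : List Int) (fps : Int) (hf : 0 < fps) (s : Int) (hs : 0 ≤ s) :
    (PySem.List.pyRange 0 (frames.length : Int) 1).any
        (fun i => PySem.List.pyGetD frames i 0 == 1 && PySem.Int.truncdiv i fps == s)
    = (PySem.List.slice frames (some (s * fps)) (some ((s + 1) * fps))).contains 1 := by
  have hA : 0 ≤ s * fps := mul_nonneg hs hf.le
  have hB : 0 ≤ (s + 1) * fps := mul_nonneg (by omega) hf.le
  have hAB : (s + 1) * fps = s * fps + fps := by ring
  rw [Bool.eq_iff_iff]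
  rw [PySem.List.slice_toNat (ha := hA) (hb := hB)]
  simp only [List.any_eq_true, PySem.List.mem_pyRange_one, Bool.and_eq_true, beq_iff_eq,
    List.contains_iff_mem]
  constructor
  · rintro ⟨i, ⟨hi0, hilen⟩, hval, hdiv⟩
    have hw := (truncdiv_eq_iff i fps s hi0 hf).1 hdiv
    have hk : i.toNat < frames.length := by omega
    rw [List.mem_iff_getElem]
    refine ⟨i.toNat - (s * fps).toNat, ?_, ?_⟩
    · simp only [List.length_take, List.length_drop]; omega
    · rw [PySem.List.pyGetD_of_nonneg _ _ hi0, List.getD_eq_getElem _ _ hk] at hval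
      simp only [List.getElem_take, List.getElem_drop]
      have hidx : (s * fps).toNat + (i.toNat - (s * fps).toNat) = i.toNat := by omega
      simp only [hidx]
      exact hval
  · intro hmem
    rw [List.mem_iff_getElem] at hmem
    obtain ⟨k, hklen, hval⟩ := hmem
    simp only [List.length_take, List.length_drop] at hklen
    simp only [List.getElem_take, List.getElem_drop] at hval
    have hklt : (s * fps).toNat + k < frames.length := by omega
    refine ⟨((s * fps).toNat + k : Nat), ⟨Int.natCast_nonneg _, by exact_mod_cast hklt⟩, ?_, ?_⟩
    · rw [PySem.List.pyGetD_of_nonneg _ _ (Int.natCast_nonneg _), Int.toNat_natCast,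
        List.getD_eq_getElem _ _ hklt]
      exact hval
    · refine (truncdiv_eq_iff _ fps s (Int.natCast_nonneg _) hf).2 ⟨?_, ?_⟩ <;> push_cast <;> omega

-- ===== VERDICT (by name: the statement is the Claim_ definition above) =====
theorem FramesToSeconds_spec : Claim_equal_FramesToSeconds := by
  intro frames fps _ hpre
  have hne : fps ≠ 0 := hpre
  unfold Spec_FramesToSeconds FramesToSeconds FramesToSeconds_alt
  simp only []
  rcases lt_or_gt_of_ne hne with hneg | hpos
  · -- fps < 0: secLen ≤ 0, both sides are []
    have hsec : PySem.Int.truncdiv (frames.length : Int) fps ≤ 0 :=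
      Int.tdiv_nonpos_of_nonneg_of_nonpos (by positivity) hneg.le
    rw [PySem.List.pyRange_one_eq_nil hsec]
    simp only [List.foldl_nil]
    exact foldl_step_nil frames fps _ _
  · -- fps > 0
    rw [PySem.List.foldl_append_singleton_eq_map (fun _ => (0 : Int)) _ [], List.nil_append]
    rw [fold_inv frames fps hpos _ _ (fun i hi => (PySem.List.mem_pyRange_one.1 hi).1) (fun _ => 0)]
    rw [PySem.List.foldl_append_singleton_eq_map
      (fun s => if (PySem.List.slice frames (some (s * fps)) (some ((s + 1) * fps))).contains 1 then (1 : Int) else 0) _ [],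
      List.nil_append]
    apply List.map_congr_left
    intro s hs
    rw [any_eq_slice frames fps hpos s (PySem.List.mem_pyRange_one.1 hs).1]
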